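-- pv_equiv track=rewrite | github.com/geunhh/algorithm | month_8/08_02/geul_ja_soo/num_str.py | comp_str
-- ===== SOURCE A (Python) =====
-- def comp_str(str1, str2):
--     str1 = (list(set(str1)))
--     max_cnt=0
--     for s1 in str1:
--         cnt = 0
--         for s2 in str2:
--             if s1 == s2 :
--                 cnt += 1
--
--         if cnt > max_cnt:
--             max_cnt = cnt
--     return max_cnt
-- ===== SOURCE B (Python) =====
-- def comp_str(str1, str2):
--     allowed = set(str1)
--     counts = {}
--     best = 0
--     for c in str2:
--         if c in allowed:
--             n = counts.get(c, 0) + 1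
--             counts[c] = n
--             if n > best:
--                 best = n
--     return best
-- ===== Notes on version B (the rewrite author's own statement) =====
-- stated objective: faster
-- what changed: Replaces A's nested loop (for each distinct char of str1, rescan all of str2) by a single pass over str2 that maintains a frequency table of allowed characters and a running maximum.
import Mathlib
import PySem

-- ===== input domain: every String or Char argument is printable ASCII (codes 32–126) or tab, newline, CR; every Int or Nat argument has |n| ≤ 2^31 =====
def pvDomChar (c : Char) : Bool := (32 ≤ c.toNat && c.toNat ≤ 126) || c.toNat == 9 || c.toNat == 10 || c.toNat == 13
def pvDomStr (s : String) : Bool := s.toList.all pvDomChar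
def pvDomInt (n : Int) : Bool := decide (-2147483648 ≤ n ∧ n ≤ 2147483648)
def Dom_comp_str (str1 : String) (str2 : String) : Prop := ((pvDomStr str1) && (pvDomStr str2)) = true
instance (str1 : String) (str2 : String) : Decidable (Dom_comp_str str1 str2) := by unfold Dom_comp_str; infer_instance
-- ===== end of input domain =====

-- B replaces A's nested loops by one pass over str2 with a frequency table and a running max (asymptotically faster).

-- ===== PORT A =====
def comp_str (str1 : String) (str2 : String) : Int :=
  let str1' := PySem.Set.ofList str1.toList
  str1'.foldl (fun max_cnt s1 =>
    let cnt := str2.toList.foldl (fun cnt s2 => if s1 == s2 then cnt + 1 else cnt) (0 : Int)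
    if cnt > max_cnt then cnt else max_cnt) (0 : Int)

-- ===== PORT B =====
def comp_str_alt (str1 : String) (str2 : String) : Int :=
  let allowed := PySem.Set.ofList str1.toList
  (str2.toList.foldl (fun (st : PySem.Dict Char Int × Int) c =>
      if PySem.Set.contains allowed c then
        let n := st.1.getD c 0 + 1
        (st.1.insert c n, if n > st.2 then n else st.2)
      else st) (PySem.Dict.empty, 0)).2

-- ===== PRECONDITION & SPEC =====
def Spec_comp_str (str1 : String) (str2 : String) (out : Int) : Prop := out = comp_str_alt str1 str2
instance (str1 : String) (str2 : String) (out : Int) : Decidable (Spec_comp_str str1 str2 out) := by unfold Spec_comp_str; infer_instance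

-- ===== CLAIM (what is proved, stated in full; the proofs are below) =====
def Claim_equal_comp_str : Prop := ∀ (str1 : String) (str2 : String), Dom_comp_str str1 str2 → Spec_comp_str str1 str2 (comp_str str1 str2)

-- ===== LEMMAS AND PROOFS =====

-- count of c in p, as an Int
def pvCnt (p : List Char) (c : Char) : Int := (p.count c : Int)

lemma pvCnt_append_ne (p : List Char) (c c' : Char) (h : c' ≠ c) : pvCnt (p ++ [c]) c' = pvCnt p c' := by
  have h0 : List.count c' [c] = 0 := List.count_eq_zero.mpr (by simp [h])
  simp [pvCnt, List.count_append, h0]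

-- running maximum of f over L, starting from acc
def pvFm (f : Char → Int) (acc : Int) (L : List Char) : Int :=
  L.foldl (fun m c => max m (f c)) acc

lemma pvFm_acc_le (f : Char → Int) (L : List Char) : ∀ acc : Int, acc ≤ pvFm f acc L := by
  induction L with
  | nil => intro acc; simp [pvFm]
  | cons c L ih =>
    intro acc
    exact le_trans (le_max_left acc (f c)) (ih (max acc (f c)))

lemma pvFm_mem_le (f : Char → Int) (L : List Char) (c : Char) (hc : c ∈ L) :
    ∀ acc : Int, f c ≤ pvFm f acc L := by
  induction L with
  | nil => cases hc
  | cons d L ih =>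
    intro acc
    rcases List.mem_cons.mp hc with h | h
    · subst h
      exact le_trans (le_max_right acc (f c)) (pvFm_acc_le f L _)
    · exact ih h _

lemma pvFm_le (f : Char → Int) (L : List Char) (b : Int) :
    ∀ acc : Int, acc ≤ b → (∀ c ∈ L, f c ≤ b) → pvFm f acc L ≤ b := by
  induction L with
  | nil => intro acc hacc _; simpa [pvFm] using hacc
  | cons c L ih =>
    intro acc hacc hall
    exact ih _ (max_le hacc (hall c (List.mem_cons_self ..))) (fun d hd => hall d (List.mem_cons_of_mem _ hd))

lemma pvFm_congr (f g : Char → Int) (L : List Char) (h : ∀ c ∈ L, f c = g c) :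
    ∀ acc : Int, pvFm f acc L = pvFm g acc L := by
  induction L with
  | nil => intro acc; rfl
  | cons c L ih =>
    intro acc
    show pvFm f (max acc (f c)) L = pvFm g (max acc (g c)) L
    rw [h c (List.mem_cons_self ..)]
    exact ih (fun d hd => h d (List.mem_cons_of_mem _ hd)) _

lemma pvFm_zero (L : List Char) : pvFm (fun _ => 0) 0 L = 0 :=
  le_antisymm (pvFm_le _ _ 0 0 le_rfl (fun _ _ => le_rfl)) (pvFm_acc_le _ _ 0)

lemma pvFm_bump (f g : Char → Int) (L : List Char) (c : Char) (hc : c ∈ L)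
    (hother : ∀ d ∈ L, d ≠ c → g d = f d) (hfc : f c ≤ g c) :
    pvFm g 0 L = max (pvFm f 0 L) (g c) := by
  apply le_antisymm
  · apply pvFm_le
    · exact le_trans (pvFm_acc_le f L 0) (le_max_left _ _)
    · intro d hd
      by_cases hdc : d = c
      · subst hdc; exact le_max_right _ _
      · exact le_trans (le_of_eq (hother d hd hdc)) (le_trans (pvFm_mem_le f L d hd 0) (le_max_left _ _))
  · apply max_le
    · apply pvFm_le
      · exact pvFm_acc_le g L 0
      · intro d hd
        by_cases hdc : d = c
        · subst hdc; exact le_trans hfc (pvFm_mem_le g L d hd 0)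
        · exact le_trans (le_of_eq (hother d hd hdc).symm) (pvFm_mem_le g L d hd 0)
    · exact pvFm_mem_le g L c hc 0

lemma pvIfMax (m x : Int) : (if x > m then x else m) = max m x := by
  rw [max_def]; split_ifs <;> omega

lemma pvInner (c : Char) (l : List Char) :
    ∀ acc : Int, l.foldl (fun cnt s2 => if c == s2 then cnt + 1 else cnt) acc = acc + pvCnt l c := by
  induction l with
  | nil => intro acc; simp [pvCnt]
  | cons s2 l ih =>
    intro acc
    by_cases h : c = s2
    · subst h
      simp only [List.foldl_cons, beq_self_eq_true, if_pos]
      rw [ih]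
      simp [pvCnt]
      ring
    · have hb : (c == s2) = false := beq_eq_false_iff_ne.mpr h
      simp only [List.foldl_cons, hb, Bool.false_eq_true, if_false]
      rw [ih]
      have hb2 : (s2 == c) = false := beq_eq_false_iff_ne.mpr (fun hh => h hh.symm)
      simp [pvCnt, List.count_cons, hb2]

lemma pvFoldl_congr {a b : Type} (f g : b -> a -> b) (h : forall x y, f x y = g x y) (init : b) (l : List a) : l.foldl f init = l.foldl g init := by
  have hfg : f = g := funext fun x => funext fun y => h x y
  rw [hfg]

lemma compA_eq (str1 str2 : String) :
    comp_str str1 str2 = pvFm (pvCnt str2.toList) 0 (PySem.Set.ofList str1.toList) := by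
  simp only [comp_str, pvFm]
  exact pvFoldl_congr _ _ (fun m c => by rw [pvInner, zero_add, pvIfMax]) 0 _

lemma loopB (allowed : PySem.Set Char) (l : List Char) :
    ∀ (p : List Char) (d : PySem.Dict Char Int) (best : Int),
    (∀ c ∈ allowed, d.getD c 0 = pvCnt p c) →
    best = pvFm (pvCnt p) 0 allowed →
    (l.foldl (fun (st : PySem.Dict Char Int × Int) c =>
        if PySem.Set.contains allowed c then
          let n := st.1.getD c 0 + 1
          (st.1.insert c n, if n > st.2 then n else st.2)
        else st) (d, best)).2
      = pvFm (pvCnt (p ++ l)) 0 allowed := by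
  induction l with
  | nil =>
    intro p d best _ hb
    simpa using hb
  | cons c l ih =>
    intro p d best hd hb
    by_cases hmem : PySem.Set.contains allowed c = true
    · have hcm : c ∈ allowed := (PySem.Set.contains_iff allowed c).mp hmem
      have hn : d.getD c 0 + 1 = pvCnt (p ++ [c]) c := by
        rw [hd c hcm]
        simp [pvCnt, List.count_append]
      have hd' : ∀ c' ∈ allowed, (d.insert c (d.getD c 0 + 1)).getD c' 0 = pvCnt (p ++ [c]) c' := by
        intro c' hc'
        rw [PySem.Dict.getD_insert]
        by_cases hcc : c' = c
        · rw [if_pos hcc, hcc, hn]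
        · rw [if_neg hcc, hd c' hc', pvCnt_append_ne p c c' hcc]
      have hb' : (if d.getD c 0 + 1 > best then d.getD c 0 + 1 else best)
          = pvFm (pvCnt (p ++ [c])) 0 allowed := by
        rw [pvIfMax, hn, hb,
          pvFm_bump (pvCnt p) (pvCnt (p ++ [c])) allowed c hcm
            (fun d' _ hdc => pvCnt_append_ne p c d' hdc)
            (by simp [pvCnt, List.count_append])]
      simp only [List.foldl_cons, if_pos hmem]
      have := ih (p ++ [c]) (d.insert c (d.getD c 0 + 1)) _ hd' hb'
      simpa [List.append_assoc] using this
    · have hcm : c ∉ allowed := fun h => hmem ((PySem.Set.contains_iff allowed c).mpr h)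
      have heq : ∀ c' ∈ allowed, pvCnt p c' = pvCnt (p ++ [c]) c' := fun c' hc' =>
        (pvCnt_append_ne p c c' (fun hh => hcm (hh ▸ hc'))).symm
      simp only [List.foldl_cons, if_neg hmem]
      have hd' : ∀ c' ∈ allowed, d.getD c' 0 = pvCnt (p ++ [c]) c' := by
        intro c' hc'; rw [hd c' hc', heq c' hc']
      have hb' : best = pvFm (pvCnt (p ++ [c])) 0 allowed := by
        rw [hb]; exact pvFm_congr _ _ allowed heq 0
      have := ih (p ++ [c]) d best hd' hb'
      simpa [List.append_assoc] using this

lemma compB_eq (str1 str2 : String) :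
    comp_str_alt str1 str2 = pvFm (pvCnt str2.toList) 0 (PySem.Set.ofList str1.toList) := by
  unfold comp_str_alt
  have := loopB (PySem.Set.ofList str1.toList) str2.toList [] PySem.Dict.empty 0
    (by intro c _; simp [pvCnt, PySem.Dict.getD_empty])
    (by
      rw [show pvCnt [] = fun _ => (0 : Int) by funext c; simp [pvCnt]]
      exact (pvFm_zero _).symm)
  simpa using this

-- ===== VERDICT (by name: the statement is the Claim_ definition above) =====
theorem comp_str_spec : Claim_equal_comp_str := by
  intro str1 str2 _
  show comp_str str1 str2 = comp_str_alt str1 str2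
  rw [compA_eq, compB_eq]
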